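-- pv_equiv track=rewrite | github.com/cog-isa/htm-core | hierarchy/util.py | zip_binary_3
-- ===== SOURCE A (Python) =====
-- def zip_binary_3(a):
--     res = 0
--     x = 1
--     for i, I in enumerate(a):
--         for j, J in enumerate(I):
--             for k, K in enumerate(J):
--                 if a[i][j][k]:
--                     res += x
--             x *= 2
--     return res
-- ===== SOURCE B (Python) =====
-- def zip_binary_3(a):
--     rows = [J for I in a for J in I]
--     res = 0
--     for J in reversed(rows):
--         res = res * 2 + sum(1 for k in J if k)
--     return res
-- ===== Notes on version B (the rewrite author's own statement) =====
-- stated objective: alternative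
-- what changed: Replaces the fused triple loop with an explicit doubling weight x=2^p by flattening to the list of innermost rows and a reversed Horner multiply-accumulate over their truth-counts, never materializing powers of two.
import Mathlib
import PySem

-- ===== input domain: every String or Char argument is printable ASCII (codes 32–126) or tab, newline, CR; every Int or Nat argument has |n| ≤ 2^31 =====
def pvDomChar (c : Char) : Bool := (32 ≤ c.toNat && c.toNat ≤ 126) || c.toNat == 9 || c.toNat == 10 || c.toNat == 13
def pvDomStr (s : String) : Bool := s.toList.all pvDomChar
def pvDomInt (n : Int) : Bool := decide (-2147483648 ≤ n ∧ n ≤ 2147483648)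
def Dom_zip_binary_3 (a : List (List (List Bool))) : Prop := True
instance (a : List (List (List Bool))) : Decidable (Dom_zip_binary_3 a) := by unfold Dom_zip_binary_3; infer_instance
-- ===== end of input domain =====

-- B changes the decomposition: flatten to rows, then a reversed Horner multiply-accumulate
-- replaces A's explicit doubling weight x = 2^p; same value, same cost (objective: alternative).

-- ===== PORT A =====
-- a[i][j][k] in A is literally the enumerated element K (indices come from enumerate), ported as K.
def zip_binary_3 (a : List (List (List Bool))) : Int :=
  (a.foldl (fun (st : Int × Int) I =>
      I.foldl (fun (st : Int × Int) J =>
        (J.foldl (fun r K => if K then r + st.2 else r) st.1, st.2 * 2)) st)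
    ((0 : Int), (1 : Int))).1

-- ===== PORT B =====
def zip_binary_3_alt (a : List (List (List Bool))) : Int :=
  let rows := a.foldl (fun acc I => acc ++ I) []
  rows.reverse.foldl
    (fun res J => res * 2 + J.foldl (fun c k => if k then c + 1 else c) (0 : Int)) 0

-- ===== PRECONDITION & SPEC =====
def Spec_zip_binary_3 (a : List (List (List Bool))) (out : Int) : Prop := out = zip_binary_3_alt a
instance (a : List (List (List Bool))) (out : Int) : Decidable (Spec_zip_binary_3 a out) := by unfold Spec_zip_binary_3; infer_instance

-- ===== CLAIM (what is proved, stated in full; the proofs are below) =====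
def Claim_equal_zip_binary_3 : Prop := ∀ (a : List (List (List Bool))), Dom_zip_binary_3 a → Spec_zip_binary_3 a (zip_binary_3 a)

-- ===== LEMMAS AND PROOFS =====

-- truth-count of a row (B's inner fold)
def pvCnt (J : List Bool) : Int := J.foldl (fun c k => if k then c + 1 else c) 0

-- canonical weighted sum over a list of rows: S [] = 0, S (J :: t) = cnt J + 2 * S t
def pvS : List (List Bool) → Int
  | [] => 0
  | J :: t => pvCnt J + 2 * pvS t

theorem pvCnt_shift (J : List Bool) (n : Int) :
    J.foldl (fun c k => if k then c + 1 else c) n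
      = n + J.foldl (fun c k => if k then c + 1 else c) 0 := by
  induction J generalizing n with
  | nil => simp
  | cons k t ih =>
    simp only [List.foldl_cons, zero_add]
    by_cases h : k = true
    · rw [if_pos h, if_pos h, ih (n + 1), ih 1]; ring
    · rw [if_neg h, if_neg h, ih n]

theorem pvCnt_cons (k : Bool) (t : List Bool) :
    pvCnt (k :: t) = (if k then 1 else 0) + pvCnt t := by
  unfold pvCnt
  rw [List.foldl_cons, pvCnt_shift]
  split_ifs <;> ring

theorem pvRow (J : List Bool) (res x : Int) :
    J.foldl (fun r K => if K then r + x else r) res = res + x * pvCnt J := by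
  induction J generalizing res with
  | nil => simp [pvCnt]
  | cons k t ih =>
    simp only [List.foldl_cons]
    rw [ih, pvCnt_cons]
    split_ifs <;> ring

theorem pvS_append (l₁ l₂ : List (List Bool)) :
    pvS (l₁ ++ l₂) = pvS l₁ + 2 ^ l₁.length * pvS l₂ := by
  induction l₁ with
  | nil => simp [pvS]
  | cons J t ih => simp [pvS, ih, pow_succ]; ring

-- A's middle loop over a block I, from state (res, x)
theorem pvMid (I : List (List Bool)) (res x : Int) :
    I.foldl (fun (st : Int × Int) J =>
        (J.foldl (fun r K => if K then r + st.2 else r) st.1, st.2 * 2)) (res, x)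
      = (res + x * pvS I, x * 2 ^ I.length) := by
  induction I generalizing res x with
  | nil => simp [pvS]
  | cons J t ih =>
    simp only [List.foldl_cons]
    rw [pvRow, ih]
    simp only [pvS, List.length_cons, Prod.mk.injEq, pow_succ]
    constructor <;> ring

-- A's outer loop equals (res + x * pvS (flatten a), x * 2^#rows)
theorem pvOuter (a : List (List (List Bool))) (res x : Int) :
    a.foldl (fun (st : Int × Int) I =>
        I.foldl (fun (st : Int × Int) J =>
          (J.foldl (fun r K => if K then r + st.2 else r) st.1, st.2 * 2)) st) (res, x)
      = (res + x * pvS (a.flatMap id), x * 2 ^ (a.flatMap id).length) := by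
  induction a generalizing res x with
  | nil => simp [pvS]
  | cons I t ih =>
    simp only [List.foldl_cons]
    rw [pvMid, ih]
    simp only [List.flatMap_cons, id, pvS_append, List.length_append, pow_add, Prod.mk.injEq]
    constructor <;> ring

theorem pvFlatten (a : List (List (List Bool))) (acc : List (List Bool)) :
    a.foldl (fun acc I => acc ++ I) acc = acc ++ a.flatMap id := by
  induction a generalizing acc with
  | nil => simp
  | cons I t ih => simp [ih]

-- B's reversed Horner fold computes pvS
theorem pvHorner (rows : List (List Bool)) :
    rows.reverse.foldl
      (fun res J => res * 2 + J.foldl (fun c k => if k then c + 1 else c) (0 : Int)) 0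
      = pvS rows := by
  induction rows with
  | nil => simp [pvS]
  | cons J t ih =>
    simp only [List.reverse_cons, List.foldl_append, List.foldl_cons, List.foldl_nil, ih, pvS]
    show pvS t * 2 + pvCnt J = pvCnt J + 2 * pvS t
    ring

-- ===== VERDICT (by name: the statement is the Claim_ definition above) =====
theorem zip_binary_3_spec : Claim_equal_zip_binary_3 := by
  intro a _
  unfold Spec_zip_binary_3 zip_binary_3 zip_binary_3_alt
  rw [pvOuter, pvFlatten, List.nil_append, pvHorner]
  simp
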